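-- pv_equiv track=rewrite | github.com/BND95618/gateway-gardens | app/plants/views.py | bloom_month_list
-- ===== SOURCE A (Python) =====
-- def bloom_month_list(start, end, options):
--     options_2x = options + options
--     list = []
--     if (start == "tbd") or (start == "None") or (end == "tbd") or (end == "None"):
--        return(list)
--     begin = False
--     for option in options_2x:
--         if option == start:
--             begin = True
--         if begin:
--             list.append(option)
--         if begin and option == end:
--             return(list)
-- ===== SOURCE B (Python) =====
-- def bloom_month_list(start, end, options):
--     if start in ("tbd", "None") or end in ("tbd", "None"):
--         return []
--     if start not in options or end not in options:
--         return None
--     i = options.index(start)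
--     rotated = options[i:] + options[:i]
--     j = rotated.index(end)
--     return rotated[:j + 1]
-- ===== Notes on version B (the rewrite author's own statement) =====
-- stated objective: simpler
-- what changed: Replaces A's flag-driven single pass over the doubled list with explicit membership checks, a rotation at the first index of start, and a slice up to the first index of end in the rotated list.
import Mathlib
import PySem

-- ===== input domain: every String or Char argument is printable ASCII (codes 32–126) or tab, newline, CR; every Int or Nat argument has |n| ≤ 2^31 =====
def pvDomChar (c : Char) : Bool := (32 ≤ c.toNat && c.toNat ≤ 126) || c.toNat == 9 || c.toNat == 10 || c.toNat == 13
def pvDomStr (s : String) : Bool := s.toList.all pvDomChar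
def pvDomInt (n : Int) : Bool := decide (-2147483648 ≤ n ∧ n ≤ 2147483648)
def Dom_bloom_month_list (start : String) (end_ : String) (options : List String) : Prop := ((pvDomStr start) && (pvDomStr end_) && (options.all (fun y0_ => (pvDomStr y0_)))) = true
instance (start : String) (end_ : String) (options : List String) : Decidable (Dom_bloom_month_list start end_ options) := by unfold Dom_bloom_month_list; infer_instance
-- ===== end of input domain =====

-- B replaces A's flag-driven scan of the doubled list by membership guards, a rotation
-- at the first index of start, and a slice up to the first index of end (objective: simpler).

-- ===== PORT A =====
-- the 'for option in options_2x' loop: state = (begin, list); falling off the loop returns None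
def bloom_month_list_loop (start : String) (end_ : String) :
    List String → Bool → List String → Option (List String)
  | [], _, _ => none
  | o :: rest, begin_, acc =>
    let begin' := if o = start then true else begin_
    let acc' := if begin' then acc ++ [o] else acc
    if begin' ∧ o = end_ then some acc'
    else bloom_month_list_loop start end_ rest begin' acc'

def bloom_month_list (start : String) (end_ : String) (options : List String) : Option (List String) :=
  let options_2x := options ++ options
  if start = "tbd" ∨ start = "None" ∨ end_ = "tbd" ∨ end_ = "None" then some []
  else bloom_month_list_loop start end_ options_2x false []

-- ===== PORT B =====
def bloom_month_list_alt (start : String) (end_ : String) (options : List String) : Option (List String) :=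
  if start = "tbd" ∨ start = "None" ∨ end_ = "tbd" ∨ end_ = "None" then some []
  else if start ∉ options ∨ end_ ∉ options then none
  else
    let i := (PySem.List.index? options start).getD 0
    let rotated := PySem.List.slice options (some (i : Int)) none ++ PySem.List.slice options none (some (i : Int))
    let j := (PySem.List.index? rotated end_).getD 0
    some (PySem.List.slice rotated none (some ((j : Int) + 1)))

-- ===== PRECONDITION & SPEC =====
def Spec_bloom_month_list (start : String) (end_ : String) (options : List String) (out : Option (List String)) : Prop := out = bloom_month_list_alt start end_ options
instance (start : String) (end_ : String) (options : List String) (out : Option (List String)) : Decidable (Spec_bloom_month_list start end_ options out) := by unfold Spec_bloom_month_list; infer_instance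

-- ===== CLAIM (what is proved, stated in full; the proofs are below) =====
def Claim_equal_bloom_month_list : Prop := ∀ (start : String) (end_ : String) (options : List String), Dom_bloom_month_list start end_ options → Spec_bloom_month_list start end_ options (bloom_month_list start end_ options)

-- ===== LEMMAS AND PROOFS =====

-- take up to and including the first occurrence of e (meaningful when e ∈ l)
def takeIncl (e : String) : List String → List String
  | [] => []
  | a :: l => if a = e then [a] else a :: takeIncl e l

theorem loop_true (start end_ : String) (l : List String) :
    ∀ acc, bloom_month_list_loop start end_ l true acc =
      if end_ ∈ l then some (acc ++ takeIncl end_ l) else none := by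
  induction l with
  | nil => intro acc; simp [bloom_month_list_loop]
  | cons o rest ih =>
    intro acc
    by_cases h : o = end_
    · subst h; simp [bloom_month_list_loop, takeIncl]
    · have h' : end_ ≠ o := fun hh => h hh.symm
      simp [bloom_month_list_loop, takeIncl, h, h', ih]

theorem loop_false_skip (start end_ : String) (p : List String) (hp : start ∉ p) :
    ∀ l acc, bloom_month_list_loop start end_ (p ++ l) false acc =
      bloom_month_list_loop start end_ l false acc := by
  induction p with
  | nil => intro l acc; rfl
  | cons o rest ih =>
    intro l acc
    have ho : o ≠ start := fun h => hp (h ▸ List.mem_cons_self)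
    have hrest : start ∉ rest := fun h => hp (List.mem_cons_of_mem _ h)
    simp [bloom_month_list_loop, ho, ih hrest]

theorem loop_false_none (start end_ : String) (l : List String) (h : start ∉ l) (acc : List String) :
    bloom_month_list_loop start end_ l false acc = none := by
  have := loop_false_skip start end_ l h [] acc
  simpa [bloom_month_list_loop] using this

theorem takeIncl_append_of_mem (e : String) (l₁ l₂ : List String) (h : e ∈ l₁) :
    takeIncl e (l₁ ++ l₂) = takeIncl e l₁ := by
  induction l₁ with
  | nil => exact absurd h (List.not_mem_nil)
  | cons a t ih =>
    by_cases ha : a = e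
    · simp [takeIncl, ha]
    · have : e ∈ t := by
        rcases List.mem_cons.mp h with h' | h'
        · exact absurd h'.symm ha
        · exact h'
      simp [takeIncl, ha, ih this]

theorem take_index_eq_takeIncl (e : String) (l : List String) :
    ∀ k, PySem.List.index? l e = some k → l.take (k + 1) = takeIncl e l := by
  induction l with
  | nil => intro k hk; simp [PySem.List.index?_eq_idxOf?, List.idxOf?] at hk
  | cons a t ih =>
    intro k hk
    by_cases ha : a = e
    · subst ha
      rw [PySem.List.index?_cons_self] at hk
      cases hk
      simp [takeIncl]
    · rw [PySem.List.index?_cons_of_ne t (fun h => ha h)] at hk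
      rcases Option.map_eq_some_iff.mp hk with ⟨m, hm, hmk⟩
      subst hmk
      simp [takeIncl, ha, ih m hm]

theorem bloom_main (start end_ : String) (options : List String) :
    bloom_month_list start end_ options = bloom_month_list_alt start end_ options := by
  unfold bloom_month_list bloom_month_list_alt
  by_cases hg : start = "tbd" ∨ start = "None" ∨ end_ = "tbd" ∨ end_ = "None"
  · simp [hg]
  · simp only [hg, if_false]
    by_cases hs : start ∈ options
    · -- decompose options at the first occurrence of start
      have hsome : (PySem.List.index? options start).isSome :=
        (PySem.List.index?_isSome_iff _ _).mpr hs
      rcases Option.isSome_iff_exists.mp hsome with ⟨i, hi⟩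
      rcases (PySem.List.index?_eq_some_iff _ _ _).mp hi with ⟨p, s, hopt, hlen, hps⟩
      rw [hi]
      simp only [Option.getD_some]
      have hrot : PySem.List.slice options (some ((i : Nat) : Int)) none ++
          PySem.List.slice options none (some ((i : Nat) : Int)) = (start :: s) ++ p := by
        rw [PySem.List.slice_from_natCast, PySem.List.slice_to_natCast, hopt, ← hlen,
          List.drop_left, List.take_left]
      -- A's scan over options ++ options: skip p, hit start
      have hA : bloom_month_list_loop start end_ (options ++ options) false [] =
          (if start = end_ then some [start]
           else if end_ ∈ s ++ options then some ([start] ++ takeIncl end_ (s ++ options)) else none) := by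
        have : options ++ options = p ++ (start :: (s ++ options)) := by
          rw [hopt]; simp
        rw [this, loop_false_skip start end_ p hps]
        by_cases hse : start = end_
        · simp [bloom_month_list_loop, hse]
        · simp [bloom_month_list_loop, hse, loop_true]
      rw [hA]
      by_cases hse : start = end_
      · -- start = end_: both give [start]
        have he : end_ ∈ options := hse ▸ hs
        simp only [hs, he, not_true_eq_false, false_or, if_false]
        rw [hrot]
        have : PySem.List.index? ((start :: s) ++ p) end_ = some 0 := by
          rw [← hse]; exact PySem.List.index?_cons_self _ _
        rw [this]
        simp only [Option.getD_some]
        simp [hse, PySem.List.slice_to]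
      · by_cases he : end_ ∈ options
        · -- end_ occurs; first occurrence in s ++ p at index k
          have hsp : end_ ∈ s ++ p := by
            rcases List.mem_append.mp (hopt ▸ he) with h' | h'
            · exact List.mem_append.mpr (Or.inr h')
            · rcases List.mem_cons.mp h' with h'' | h''
              · exact absurd h''.symm hse
              · exact List.mem_append.mpr (Or.inl h'')
          have hksome : (PySem.List.index? (s ++ p) end_).isSome :=
            (PySem.List.index?_isSome_iff _ _).mpr hsp
          rcases Option.isSome_iff_exists.mp hksome with ⟨k, hk⟩
          simp only [hs, he, not_true_eq_false, false_or, if_false]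
          rw [hrot]
          have hjr : PySem.List.index? ((start :: s) ++ p) end_ = some (k + 1) := by
            have : (start :: s) ++ p = start :: (s ++ p) := by simp
            rw [this, PySem.List.index?_cons_of_ne _ (fun h => hse (by simpa using h)), hk]
            rfl
          rw [hjr]
          simp only [Option.getD_some]
          have hmem : end_ ∈ s ++ options := by
            rcases List.mem_append.mp hsp with h' | h'
            · exact List.mem_append.mpr (Or.inl h')
            · exact List.mem_append.mpr (Or.inr (hopt ▸ List.mem_append.mpr (Or.inl h')))
          have hti : takeIncl end_ (s ++ options) = takeIncl end_ (s ++ p) := by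
            by_cases hes : end_ ∈ s
            · rw [takeIncl_append_of_mem _ _ _ hes, takeIncl_append_of_mem _ _ _ hes]
            · have hep : end_ ∈ p := by
                rcases List.mem_append.mp hsp with h' | h'
                · exact absurd h' hes
                · exact h'
              have h1 : s ++ options = (s ++ p) ++ (start :: s) := by rw [hopt]; simp
              rw [h1, takeIncl_append_of_mem]
              exact List.mem_append.mpr (Or.inr hep)
          have hcast : ((((k + 1 : Nat)) : Int) + 1) = (((k + 2 : Nat)) : Int) := by push_cast; ring
          rw [hcast, PySem.List.slice_to_natCast]
          have htake : ((start :: s) ++ p).take (k + 2) = start :: takeIncl end_ (s ++ p) := by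
            have : (start :: s) ++ p = start :: (s ++ p) := by simp
            rw [this, List.take_succ_cons, take_index_eq_takeIncl end_ (s ++ p) k hk]
          rw [htake]
          simp [hse, hmem, hti]
        · -- end_ absent: both none
          have hnsopt : end_ ∉ s ++ options := by
            intro h
            rcases List.mem_append.mp h with h' | h'
            · exact he (hopt ▸ List.mem_append.mpr (Or.inr (List.mem_cons_of_mem _ h')))
            · exact he h'
          simp [hse, hnsopt, hs, he]
    · -- start absent: A's scan falls off, B returns none
      have : start ∉ options ++ options := by
        intro h; rcases List.mem_append.mp h with h' | h' <;> exact hs h'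
      rw [loop_false_none start end_ _ this]
      simp [hs]

-- ===== VERDICT (by name: the statement is the Claim_ definition above) =====
theorem bloom_month_list_spec : Claim_equal_bloom_month_list := by
  intro start end_ options _
  show bloom_month_list start end_ options = bloom_month_list_alt start end_ options
  exact bloom_main start end_ options
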